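-- pv_equiv track=rewrite | github.com/rostcheck/guidance-for-advertising-agents-on-aws | scripts/generate_aws_config.py | generate_color_from_name
-- ===== SOURCE A (Python) =====
-- def generate_color_from_name(agent_name):
--     """Generate a consistent color based on agent name"""
--     # Predefined color palette for consistency
--     colors = [
--         "#7A4B8C",
--         "#47297B",
--         "#8736AA",
--         "#5D2689",
--         "#6B3A9A",
--         "#5A3B8E",
--         "#6D4C92",
--         "#7F5D96",
--         "#6A4A94",
--         "#8A5B9E",
--         "#7B5A9C",
--         "#8C6BA0",
--         "#7C3AED",
--         "#5D2689",
--     ]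
--
--     # Generate hash from agent name for consistent color assignment
--     hash_value = 0
--     for char in agent_name:
--         hash_value = ((hash_value << 5) - hash_value) + ord(char)
--         hash_value = hash_value & 0xFFFFFFFF  # Keep it 32-bit
--
--     return colors[abs(hash_value) % len(colors)]
-- ===== SOURCE B (Python) =====
-- def generate_color_from_name(agent_name):
--     """Generate a consistent color based on agent name"""
--     colors = [
--         "#7A4B8C",
--         "#47297B",
--         "#8736AA",
--         "#5D2689",
--         "#6B3A9A",
--         "#5A3B8E",
--         "#6D4C92",
--         "#7F5D96",
--         "#6A4A94",
--         "#8A5B9E",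
--         "#7B5A9C",
--         "#8C6BA0",
--         "#7C3AED",
--         "#5D2689",
--     ]
--
--     # Same 32-bit polynomial hash, evaluated as a positional weighted sum:
--     # hash = sum(ord(c) * 31**position) mod 2**32, reduced once at the end.
--     M = 2 ** 32
--     total = sum(ord(c) * pow(31, i, M) for i, c in enumerate(reversed(agent_name)))
--     return colors[total % M % len(colors)]
-- ===== Notes on version B (the rewrite author's own statement) =====
-- stated objective: alternative
-- what changed: Replaces the per-character Horner step with masking ((h<<5)-h+ord, & 0xFFFFFFFF each iteration) by an explicit positional weighted sum: sum of ord(c)*pow(31,position,2**32) over enumerate(reversed(name)), reduced mod 2**32 once at the end; the abs() becomes redundant and is dropped.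
import Mathlib
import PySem

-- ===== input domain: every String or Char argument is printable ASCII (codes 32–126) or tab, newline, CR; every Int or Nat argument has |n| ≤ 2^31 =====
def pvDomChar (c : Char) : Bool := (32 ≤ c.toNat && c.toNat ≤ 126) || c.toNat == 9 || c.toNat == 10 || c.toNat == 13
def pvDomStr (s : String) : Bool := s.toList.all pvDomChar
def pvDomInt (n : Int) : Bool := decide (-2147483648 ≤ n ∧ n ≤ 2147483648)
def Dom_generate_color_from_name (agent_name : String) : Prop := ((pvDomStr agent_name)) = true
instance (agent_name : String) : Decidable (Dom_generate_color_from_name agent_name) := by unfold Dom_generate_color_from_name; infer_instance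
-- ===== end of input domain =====

-- B evaluates the same 32-bit polynomial hash as an explicit positional weighted sum
-- (one final reduction mod 2^32, abs dropped) instead of A's per-step masked Horner loop.


-- ===== PORT A =====
def pvColorsA : List String :=
  ["#7A4B8C", "#47297B", "#8736AA", "#5D2689", "#6B3A9A", "#5A3B8E", "#6D4C92",
   "#7F5D96", "#6A4A94", "#8A5B9E", "#7B5A9C", "#8C6BA0", "#7C3AED", "#5D2689"]

-- the for-loop: hash_value = ((hash_value << 5) - hash_value) + ord(char); hash_value &= 0xFFFFFFFF
def pvHashA : List Char → Int → Int
  | [], h => h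
  | c :: cs, h => pvHashA cs (PySem.Int.band (((h <<< (5 : Nat)) - h) + (c.toNat : Int)) 0xFFFFFFFF)

def generate_color_from_name (agent_name : String) : String :=
  let hash_value := pvHashA agent_name.toList 0
  -- colors[abs(hash_value) % len(colors)]: the index is a Nat < 14, so getD is exact (no IndexError)
  pvColorsA.getD (hash_value.natAbs % pvColorsA.length) ""

-- ===== PORT B =====
def pvColorsB : List String :=
  ["#7A4B8C", "#47297B", "#8736AA", "#5D2689", "#6B3A9A", "#5A3B8E", "#6D4C92",
   "#7F5D96", "#6A4A94", "#8A5B9E", "#7B5A9C", "#8C6BA0", "#7C3AED", "#5D2689"]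

def pvM : Nat := 2 ^ 32

def generate_color_from_name_alt (agent_name : String) : String :=
  -- sum(ord(c) * pow(31, i, M) for i, c in enumerate(reversed(agent_name)))
  -- (all values are nonnegative Python ints, so computed in Nat; the enumerate index is ≥ 0, toNat exact)
  let total : Nat :=
    ((PySem.List.enumerate agent_name.toList.reverse).map
      (fun p => p.2.toNat * (31 ^ p.1.toNat % pvM))).sum
  -- colors[total % M % len(colors)]: index < 14, getD exact
  pvColorsB.getD (total % pvM % pvColorsB.length) ""

-- ===== PRECONDITION & SPEC =====
def Spec_generate_color_from_name (agent_name : String) (out : String) : Prop := out = generate_color_from_name_alt agent_name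
instance (agent_name : String) (out : String) : Decidable (Spec_generate_color_from_name agent_name out) := by unfold Spec_generate_color_from_name; infer_instance

-- ===== CLAIM (what is proved, stated in full; the proofs are below) =====
def Claim_equal_generate_color_from_name : Prop := ∀ (agent_name : String), Dom_generate_color_from_name agent_name → Spec_generate_color_from_name agent_name (generate_color_from_name agent_name)

-- ===== LEMMAS AND PROOFS =====

-- the polynomial Σ cᵢ·31^i over a (little-endian) character list
def pvP : List Char → Nat
  | [] => 0
  | c :: cs => c.toNat + 31 * pvP cs

-- Nat version of A's loop body sequence
def pvHornerN : List Char → Nat → Nat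
  | [], m => m
  | c :: cs, m => pvHornerN cs ((31 * m + c.toNat) % pvM)

theorem pvHashA_eq_hornerN : ∀ (l : List Char) (m : Nat), pvHashA l (m : Int) = (pvHornerN l m : Int) := by
  intro l
  induction l with
  | nil => intro m; rfl
  | cons c cs ih =>
    intro m
    show pvHashA cs (PySem.Int.band ((((m : Int) <<< (5 : Nat)) - m) + (c.toNat : Int)) 0xFFFFFFFF) = _
    have h1 : (((m : Int) <<< (5 : Nat)) - m) + (c.toNat : Int) = ((31 * m + c.toNat : Nat) : Int) := by
      rw [Int.shiftLeft_eq]; push_cast; ring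
    have h3 : (31 * m + c.toNat) &&& 4294967295 = (31 * m + c.toNat) % pvM := by
      have h4 := Nat.and_two_pow_sub_one_eq_mod (31 * m + c.toNat) 32
      norm_num [pvM] at h4 ⊢
      exact h4
    have h2 : PySem.Int.band ((31 * m + c.toNat : Nat) : Int) 0xFFFFFFFF
        = (((31 * m + c.toNat) % pvM : Nat) : Int) := by
      have h5 : (0xFFFFFFFF : Int) = ((4294967295 : Nat) : Int) := by norm_num
      rw [h5, PySem.Int.band_natCast, h3]
    rw [h1, h2, ih]
    rfl

theorem pvP_append_singleton : ∀ (xs : List Char) (c : Char),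
    pvP (xs ++ [c]) = pvP xs + c.toNat * 31 ^ xs.length := by
  intro xs c
  induction xs with
  | nil => simp [pvP]
  | cons x t ih => simp [pvP, ih, List.length_cons, pow_succ]; ring

theorem pvHornerN_char : ∀ (l : List Char) (m : Nat), m < pvM →
    pvHornerN l m = (m * 31 ^ l.length + pvP l.reverse) % pvM := by
  intro l
  induction l with
  | nil => intro m hm; simp [pvHornerN, pvP, Nat.mod_eq_of_lt hm]
  | cons c cs ih =>
    intro m hm
    show pvHornerN cs ((31 * m + c.toNat) % pvM) = _
    rw [ih _ (Nat.mod_lt _ (by norm_num [pvM]))]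
    have hcong : ((31 * m + c.toNat) % pvM) * 31 ^ cs.length + pvP cs.reverse
        ≡ (31 * m + c.toNat) * 31 ^ cs.length + pvP cs.reverse [MOD pvM] :=
      Nat.ModEq.add_right _ (Nat.ModEq.mul_right _ (Nat.mod_modEq _ _))
    rw [hcong]
    have hrev : (c :: cs).reverse = cs.reverse ++ [c] := by simp
    rw [hrev, pvP_append_singleton, List.length_reverse, List.length_cons]
    congr 1
    ring

theorem pvEnumSum_modEq : ∀ (l : List Char) (k : Nat),
    ((PySem.List.enumerate l (k : Int)).map (fun p => p.2.toNat * (31 ^ p.1.toNat % pvM))).sum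
      ≡ 31 ^ k * pvP l [MOD pvM] := by
  intro l
  induction l with
  | nil => intro k; simp only [PySem.List.enumerate_nil, List.map_nil, List.sum_nil, pvP, Nat.mul_zero]; rfl
  | cons c cs ih =>
    intro k
    rw [PySem.List.enumerate_cons]
    have hk1 : ((k : Int) + 1) = ((k + 1 : Nat) : Int) := by push_cast; ring
    simp only [List.map_cons, List.sum_cons, hk1]
    have hhead : c.toNat * (31 ^ ((k : Int)).toNat % pvM) ≡ c.toNat * 31 ^ k [MOD pvM] := by
      simpa using Nat.ModEq.mul_left c.toNat (Nat.mod_modEq (31 ^ k) pvM)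
    have := Nat.ModEq.add hhead (ih (k + 1))
    calc c.toNat * (31 ^ ((k : Int)).toNat % pvM)
          + ((PySem.List.enumerate cs ((k + 1 : Nat) : Int)).map
              (fun p => p.2.toNat * (31 ^ p.1.toNat % pvM))).sum
        ≡ c.toNat * 31 ^ k + 31 ^ (k + 1) * pvP cs [MOD pvM] := this
      _ = 31 ^ k * pvP (c :: cs) := by simp [pvP, pow_succ]; ring

theorem pvIndex_eq (l : List Char) :
    (pvHashA l 0).natAbs = ((PySem.List.enumerate l.reverse (0 : Int)).map
      (fun p => p.2.toNat * (31 ^ p.1.toNat % pvM))).sum % pvM := by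
  have h0 : (0 : Int) = ((0 : Nat) : Int) := rfl
  rw [h0, pvHashA_eq_hornerN, Int.natAbs_natCast,
      pvHornerN_char l 0 (by norm_num [pvM])]
  have h := pvEnumSum_modEq l.reverse 0
  unfold Nat.ModEq at h
  simpa using h.symm

-- ===== VERDICT (by name: the statement is the Claim_ definition above) =====
theorem generate_color_from_name_spec : Claim_equal_generate_color_from_name := by
  intro agent_name _
  show pvColorsA.getD ((pvHashA agent_name.toList 0).natAbs % pvColorsA.length) ""
      = pvColorsB.getD
        (((PySem.List.enumerate agent_name.toList.reverse).map
            (fun p => p.2.toNat * (31 ^ p.1.toNat % pvM))).sum % pvM % pvColorsB.length) ""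
  rw [pvIndex_eq]
  rfl
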